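-- pv_equiv track=rewrite | github.com/Alexandru2984/pdf_Editor_v2 | pdfeditor/pdf_processor.py | map_font_name
-- ===== SOURCE A (Python) =====
-- def map_font_name(original_font: str) -> str:
--     clean = (original_font or "").lower()
--     if "+" in clean:
--         clean = clean.split("+", 1)[1]
--     clean2 = clean.replace("-", "").replace(" ", "")
--
--     is_bold = any(x in clean2 for x in ("bold", "bd", "heavy", "black"))
--     is_italic = any(x in clean2 for x in ("italic", "it", "oblique", "slant"))
--
--     if any(x in clean2 for x in ("times", "timesnewroman", "timesroman")):
--         if is_bold and is_italic: return "tibi"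
--         if is_bold: return "tibo"
--         if is_italic: return "tiri"
--         return "tiro"
--
--     if any(x in clean2 for x in ("helvetica", "arial")):
--         if is_bold and is_italic: return "hebi"
--         if is_bold: return "hebo"
--         if is_italic: return "heit"
--         return "helv"
--
--     if any(x in clean2 for x in ("courier", "couriernew", "mono")):
--         if is_bold and is_italic: return "cobi"
--         if is_bold: return "cobo"
--         if is_italic: return "coit"
--         return "cour"
--
--     if "symbol" in clean2:
--         return "symb"
--     if "zapf" in clean2 or "dingbat" in clean2:
--         return "zadb"
--
--     return "helv"
-- ===== SOURCE B (Python) =====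
-- FAMILY_KEYWORDS = (
--     # minimized by substring subsumption: "timesnewroman"/"timesroman" contain
--     # "times", "couriernew" contains "courier", so those extra keywords are redundant
--     ("times", "ti"), ("helvetica", "he"), ("arial", "he"),
--     ("courier", "co"), ("mono", "co"),
--     ("symbol", "sy"), ("zapf", "za"), ("dingbat", "za"),
-- )
--
-- PLAIN_SUFFIX = {"ti": "ro", "he": "lv", "co": "ur"}
--
-- def map_font_name(original_font: str) -> str:
--     clean = (original_font or "").lower()
--     if "+" in clean:
--         clean = clean.split("+", 1)[1]
--     clean2 = clean.replace("-", "").replace(" ", "")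
--
--     fam = None
--     for kw, tag in FAMILY_KEYWORDS:
--         if kw in clean2:
--             fam = tag
--             break
--     if fam is None:
--         return "helv"
--     if fam == "sy":
--         return "symb"
--     if fam == "za":
--         return "zadb"
--
--     # synthesize the code from family prefix + style suffix
--     # ("italic" contains "it", so "italic" is redundant as a keyword)
--     bold = any(k in clean2 for k in ("bold", "bd", "heavy", "black"))
--     italic = any(k in clean2 for k in ("it", "oblique", "slant"))
--     if bold:
--         suffix = "bi" if italic else "bo"
--     elif italic:
--         suffix = "ri" if fam == "ti" else "it"
--     else:
--         suffix = PLAIN_SUFFIX[fam]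
--     return fam + suffix
-- ===== Notes on version B (the rewrite author's own statement) =====
-- stated objective: simpler
-- what changed: Instead of A's per-family branch blocks enumerating twelve full codes over redundant keyword lists, B does one prioritized scan over a substring-subsumption-minimized keyword list to pick a family tag, then synthesizes the code compositionally as family prefix + style suffix.
import Mathlib
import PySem

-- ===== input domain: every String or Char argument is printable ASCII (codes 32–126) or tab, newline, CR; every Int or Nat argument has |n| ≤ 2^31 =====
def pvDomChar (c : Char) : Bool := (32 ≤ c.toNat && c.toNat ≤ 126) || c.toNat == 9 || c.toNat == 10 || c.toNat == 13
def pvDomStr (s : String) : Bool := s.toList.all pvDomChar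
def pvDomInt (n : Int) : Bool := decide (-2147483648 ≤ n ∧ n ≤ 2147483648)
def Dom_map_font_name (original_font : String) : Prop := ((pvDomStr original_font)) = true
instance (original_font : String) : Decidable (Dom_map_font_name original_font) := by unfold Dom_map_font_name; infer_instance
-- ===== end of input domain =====

-- B replaces A's per-family branch blocks (redundant keyword lists, twelve enumerated codes) by one
-- prioritized scan over a subsumption-minimized keyword list plus compositional prefix+suffix code
-- synthesis (objective: simpler). Return values only; neither version mutates anything.

-- ===== PORT A =====
def map_font_name (original_font : String) : String :=
  -- `(original_font or "")` is the identity on strings up to the subsequent .lower()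
  let clean := PySem.Str.lower (if original_font == "" then "" else original_font)
  let clean := if PySem.Str.isIn "+" clean
    then (((PySem.Str.splitMax? clean "+" 1).getD []).getD 1 "")
    else clean
  let clean2 := PySem.Str.replace (PySem.Str.replace clean "-" "") " " ""
  let is_bold := ["bold", "bd", "heavy", "black"].any (fun x => PySem.Str.isIn x clean2)
  let is_italic := ["italic", "it", "oblique", "slant"].any (fun x => PySem.Str.isIn x clean2)
  if ["times", "timesnewroman", "timesroman"].any (fun x => PySem.Str.isIn x clean2) then
    if is_bold && is_italic then "tibi"
    else if is_bold then "tibo"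
    else if is_italic then "tiri"
    else "tiro"
  else if ["helvetica", "arial"].any (fun x => PySem.Str.isIn x clean2) then
    if is_bold && is_italic then "hebi"
    else if is_bold then "hebo"
    else if is_italic then "heit"
    else "helv"
  else if ["courier", "couriernew", "mono"].any (fun x => PySem.Str.isIn x clean2) then
    if is_bold && is_italic then "cobi"
    else if is_bold then "cobo"
    else if is_italic then "coit"
    else "cour"
  else if PySem.Str.isIn "symbol" clean2 then "symb"
  else if PySem.Str.isIn "zapf" clean2 || PySem.Str.isIn "dingbat" clean2 then "zadb"
  else "helv"

-- ===== PORT B =====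
def pvFamilyKeywords : List (String × String) :=
  [("times", "ti"), ("helvetica", "he"), ("arial", "he"),
   ("courier", "co"), ("mono", "co"),
   ("symbol", "sy"), ("zapf", "za"), ("dingbat", "za")]

-- the `for kw, tag in FAMILY_KEYWORDS: if kw in clean2: fam = tag; break` loop
def pvFindFamily (clean2 : String) : List (String × String) → Option String
  | [] => none
  | (kw, tag) :: rest =>
    if PySem.Str.isIn kw clean2 then some tag else pvFindFamily clean2 rest

def pvPlainSuffix : PySem.Dict String String :=
  PySem.Dict.ofList [("ti", "ro"), ("he", "lv"), ("co", "ur")]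

def map_font_name_alt (original_font : String) : String :=
  let clean := PySem.Str.lower (if original_font == "" then "" else original_font)
  let clean := if PySem.Str.isIn "+" clean
    then (((PySem.Str.splitMax? clean "+" 1).getD []).getD 1 "")
    else clean
  let clean2 := PySem.Str.replace (PySem.Str.replace clean "-" "") " " ""
  match pvFindFamily clean2 pvFamilyKeywords with
  | none => "helv"
  | some fam =>
    if fam == "sy" then "symb"
    else if fam == "za" then "zadb"
    else
      let bold := ["bold", "bd", "heavy", "black"].any (fun k => PySem.Str.isIn k clean2)
      let italic := ["it", "oblique", "slant"].any (fun k => PySem.Str.isIn k clean2)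
      let suffix :=
        if bold then (if italic then "bi" else "bo")
        else if italic then (if fam == "ti" then "ri" else "it")
        -- PLAIN_SUFFIX[fam]: fam is one of its keys here, so the KeyError branch is unreachable
        else (pvPlainSuffix.get? fam).getD ""
      fam ++ suffix

-- ===== PRECONDITION & SPEC =====
def Spec_map_font_name (original_font : String) (out : String) : Prop := out = map_font_name_alt original_font
instance (original_font : String) (out : String) : Decidable (Spec_map_font_name original_font out) := by unfold Spec_map_font_name; infer_instance

-- ===== CLAIM (what is proved, stated in full; the proofs are below) =====
def Claim_equal_map_font_name : Prop := ∀ (original_font : String), Dom_map_font_name original_font → Spec_map_font_name original_font (map_font_name original_font)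

-- ===== LEMMAS AND PROOFS =====
-- substring containment is transitive: if `b` contains `a` and `b` occurs in `s`, so does `a`
theorem isIn_mono {a b : String} (h : a.toList <:+: b.toList) (s : String) :
    PySem.Str.isIn b s = true → PySem.Str.isIn a s = true := by
  simp only [PySem.Str.isIn_iff_infix]
  exact fun hb => h.trans hb

theorem any_times (s : String) :
    (["times", "timesnewroman", "timesroman"].any (fun x => PySem.Str.isIn x s)) =
      PySem.Str.isIn "times" s := by
  simp only [List.any_cons, List.any_nil, Bool.or_false]
  cases h1 : PySem.Str.isIn "timesnewroman" s with
  | true =>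
    rw [isIn_mono (by decide) s h1]
    simp
  | false =>
    cases h2 : PySem.Str.isIn "timesroman" s with
    | true =>
      rw [isIn_mono (by decide) s h2]
      simp
    | false => simp

theorem any_courier (s : String) :
    (["courier", "couriernew", "mono"].any (fun x => PySem.Str.isIn x s)) =
      (PySem.Str.isIn "courier" s || PySem.Str.isIn "mono" s) := by
  simp only [List.any_cons, List.any_nil, Bool.or_false]
  cases h2 : PySem.Str.isIn "couriernew" s with
  | true =>
    rw [isIn_mono (by decide) s h2]
    simp
  | false => simp

theorem any_italic (s : String) :
    (["italic", "it", "oblique", "slant"].any (fun x => PySem.Str.isIn x s)) =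
      (["it", "oblique", "slant"].any (fun x => PySem.Str.isIn x s)) := by
  simp only [List.any_cons, List.any_nil]
  cases h : PySem.Str.isIn "italic" s with
  | false => simp
  | true =>
    have h2 := isIn_mono (a := "it") (by decide) s h
    simp only [h2, Bool.true_or]

-- both decision tails as pure Boolean functions of the atomic substring tests
set_option maxHeartbeats 2000000 in
theorem branch_eq (ti he ar co mo sy za di b i : Bool) :
    (if ti then
      (if b && i then "tibi" else if b then "tibo" else if i then "tiri" else "tiro")
    else if he || ar then
      (if b && i then "hebi" else if b then "hebo" else if i then "heit" else "helv")
    else if co || mo then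
      (if b && i then "cobi" else if b then "cobo" else if i then "coit" else "cour")
    else if sy then "symb"
    else if za || di then "zadb"
    else "helv")
    =
    (match (if ti then some "ti" else if he then some "he" else if ar then some "he"
            else if co then some "co" else if mo then some "co" else if sy then some "sy"
            else if za then some "za" else if di then some "za" else none) with
     | none => "helv"
     | some fam =>
       if fam == "sy" then "symb"
       else if fam == "za" then "zadb"
       else
         fam ++ (if b then (if i then "bi" else "bo")
                 else if i then (if fam == "ti" then "ri" else "it")
                 else (pvPlainSuffix.get? fam).getD "")) := by
  cases ti <;> cases he <;> cases ar <;> cases co <;> cases mo <;>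
  cases sy <;> cases za <;> cases di <;> cases b <;> cases i <;> rfl

-- ===== VERDICT (by name: the statement is the Claim_ definition above) =====
set_option maxHeartbeats 2000000 in
theorem map_font_name_spec : Claim_equal_map_font_name := by
  intro f _
  unfold Spec_map_font_name map_font_name map_font_name_alt
  simp only []
  generalize (PySem.Str.replace (PySem.Str.replace _ "-" "") " " "") = s
  simp only [any_times, any_courier, any_italic]
  simp only [pvFindFamily, pvFamilyKeywords, List.any_cons, List.any_nil, Bool.or_false]
  exact branch_eq _ _ _ _ _ _ _ _ _ _
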